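-- pv_equiv track=rewrite | github.com/iMetOsaka/UNAGI | app/unagi.py | getSplicedTranscript
-- ===== SOURCE A (Python) =====
-- def getSplicedTranscript(exons):
-- 	start=None
-- 	lastexon=None
-- 	spliceSites=[]
-- 	for exon in exons:
-- 		#the first part of each read should be the same chromosome name
-- 		chr = exon[0]
-- 		#the end position of the previous exon is the start of a splice site
-- 		if lastexon is not None:
-- 			spliceSites.append(lastexon[2])
-- 		#the start position of the first exon should be the start of the transcript
-- 		if start is None:
-- 			start = exon[1]
-- 		#the start position of the other exons are the end of splice sites
-- 		else:
-- 			spliceSites.append(exon[1])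
-- 		lastexon=exon
-- 	#the remaining end position at the end of the loop is the end of the transcript
-- 	end=lastexon[2]
-- 	return [chr,start,end,spliceSites]
-- ===== SOURCE B (Python) =====
-- def getSplicedTranscript(exons):
-- 	# Flatten all exon boundary coordinates in order; the interior coordinates
-- 	# are exactly the splice sites, the outer two are the transcript bounds.
-- 	coords = []
-- 	for exon in exons:
-- 		coords.append(exon[1])
-- 		coords.append(exon[2])
-- 	return [exons[-1][0], coords[0], coords[-1], coords[1:-1]]
-- ===== Notes on version B (the rewrite author's own statement) =====
-- stated objective: alternative
-- what changed: Instead of A's stateful loop with start/lastexon flags emitting splice sites conditionally, B flattens all exon boundary coordinates into one list and reads start, end and splice sites off it by indexing/slicing (coords[0], coords[-1], coords[1:-1]).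
import Mathlib
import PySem

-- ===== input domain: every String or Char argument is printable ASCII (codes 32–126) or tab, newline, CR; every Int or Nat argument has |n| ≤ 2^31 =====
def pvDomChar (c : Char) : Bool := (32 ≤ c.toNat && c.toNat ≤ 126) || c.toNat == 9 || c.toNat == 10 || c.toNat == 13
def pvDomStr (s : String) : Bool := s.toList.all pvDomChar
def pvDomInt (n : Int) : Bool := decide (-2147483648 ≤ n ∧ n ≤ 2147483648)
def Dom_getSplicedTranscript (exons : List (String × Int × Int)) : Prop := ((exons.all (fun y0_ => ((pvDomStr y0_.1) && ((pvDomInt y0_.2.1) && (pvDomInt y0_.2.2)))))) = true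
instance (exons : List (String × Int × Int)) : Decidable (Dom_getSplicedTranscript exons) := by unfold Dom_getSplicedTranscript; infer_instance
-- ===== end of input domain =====

-- B flattens all exon boundary coordinates into one list and reads start/end/splice sites off it by indexing and slicing, instead of A's stateful flag-tracking loop (objective: alternative).


-- ===== PORT A =====
-- A's loop body; state: (start, lastexon, spliceSites, chr); on [] Python raises TypeError (excluded by Pre_)
def stepA (s : Option Int × Option (String × Int × Int) × List Int × String)
    (exon : String × Int × Int) : Option Int × Option (String × Int × Int) × List Int × String :=
  let chr := exon.1
  let ss := match s.2.1 with
    | some le => s.2.2.1 ++ [le.2.2]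
    | none => s.2.2.1
  match s.1 with
  | none => (some exon.2.1, some exon, ss, chr)
  | some v => (some v, some exon, ss ++ [exon.2.1], chr)

def getSplicedTranscript (exons : List (String × Int × Int)) : String × Int × Int × List Int :=
  match exons.foldl stepA (none, none, [], "") with
  | (some start, some le, ss, chr) => (chr, start, le.2.2, ss)
  | (some _, none, _, _) => ("", 0, 0, [])
  | (none, _, _, _) => ("", 0, 0, [])

-- ===== PORT B =====
-- B's loop body: append both boundary coordinates of an exon
def stepC (acc : List Int) (exon : String × Int × Int) : List Int :=
  acc ++ [exon.2.1, exon.2.2]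

def getSplicedTranscript_alt (exons : List (String × Int × Int)) : String × Int × Int × List Int :=
  let coords := exons.foldl stepC []
  match PySem.List.pyGet? exons (-1), PySem.List.pyGet? coords 0, PySem.List.pyGet? coords (-1) with
  | some le, some c0, some cl => (le.1, c0, cl, PySem.List.slice coords (some 1) (some (-1)))
  | _, _, _ => ("", 0, 0, [])

-- ===== PRECONDITION & SPEC =====
-- On the empty list both Pythons raise (A: TypeError, B: IndexError), so it is excluded.
def Pre_getSplicedTranscript (exons : List (String × Int × Int)) : Prop := exons ≠ []
instance (exons : List (String × Int × Int)) : Decidable (Pre_getSplicedTranscript exons) := by unfold Pre_getSplicedTranscript; infer_instance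
def pvWitness_getSplicedTranscript : (List (String × Int × Int)) := [("chr1", 3, 10), ("chr1", 20, 30)]

def Spec_getSplicedTranscript (exons : List (String × Int × Int)) (out : String × Int × Int × List Int) : Prop := out = getSplicedTranscript_alt exons
instance (exons : List (String × Int × Int)) (out : String × Int × Int × List Int) : Decidable (Spec_getSplicedTranscript exons out) := by unfold Spec_getSplicedTranscript; infer_instance

-- ===== CLAIM (what is proved, stated in full; the proofs are below) =====
def Claim_equal_getSplicedTranscript : Prop := ∀ (exons : List (String × Int × Int)), Dom_getSplicedTranscript exons → Pre_getSplicedTranscript exons → Spec_getSplicedTranscript exons (getSplicedTranscript exons)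

-- ===== LEMMAS AND PROOFS =====

-- the interleaved splice-site list [le.end, c1.start, c1.end, c2.start, …]
def pairSites (le : String × Int × Int) : List (String × Int × Int) → List Int
  | [] => []
  | c :: cs => le.2.2 :: c.2.1 :: pairSites c cs

theorem stepA_some (s : Int) (le : String × Int × Int) (ss : List Int) (ch : String)
    (exon : String × Int × Int) :
    stepA (some s, some le, ss, ch) exon = (some s, some exon, ss ++ [le.2.2, exon.2.1], exon.1) := by
  simp [stepA]

-- A's loop, once initialised by the first exon, produces pairSites
theorem foldA_char (rest : List (String × Int × Int)) :
    ∀ (s : Int) (le : String × Int × Int) (ss : List Int) (ch : String),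
    rest.foldl stepA (some s, some le, ss, ch)
    = (some s, some (rest.getLastD le), ss ++ pairSites le rest,
        match rest with | [] => ch | _ => (rest.getLastD le).1) := by
  induction rest with
  | nil => intro s le ss ch; simp [pairSites]
  | cons c cs ih =>
      intro s le ss ch
      rw [List.foldl_cons, stepA_some, ih s c (ss ++ [le.2.2, c.2.1]) c.1, List.getLastD_cons]
      cases cs with
      | nil => simp [pairSites, List.getLastD]
      | cons d ds => simp [pairSites]

-- B's coordinate flattening
theorem foldC_eq (l : List (String × Int × Int)) :
    ∀ acc : List Int, l.foldl stepC acc = acc ++ l.flatMap (fun e => [e.2.1, e.2.2]) := by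
  induction l with
  | nil => intro acc; simp
  | cons e es ih => intro acc; rw [List.foldl_cons]; simp [stepC, ih]

-- the interior of the flattened coordinate list of e :: rest is pairSites e rest
theorem interior_eq (rest : List (String × Int × Int)) (e : String × Int × Int) :
    (((e :: rest).flatMap (fun x => [x.2.1, x.2.2])).drop 1).dropLast = pairSites e rest := by
  induction rest generalizing e with
  | nil => simp [pairSites]
  | cons c cs ih =>
      have h := ih c
      simp only [List.flatMap_cons, List.cons_append, List.nil_append, List.drop_succ_cons,
        List.drop_zero] at h ⊢
      rw [List.dropLast_cons₂, List.dropLast_cons₂, h]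
      simp [pairSites]

theorem getLast?_cons_eq_getLastD (e : String × Int × Int) (rest : List (String × Int × Int)) :
    (e :: rest).getLast? = some (rest.getLastD e) := by
  induction rest generalizing e with
  | nil => simp
  | cons c cs ih => rw [List.getLast?_cons_cons, ih c, List.getLastD_cons]

-- last flattened coordinate = end of the last exon
theorem getLast?_flat (rest : List (String × Int × Int)) (e : String × Int × Int) :
    ((e :: rest).flatMap (fun x => [x.2.1, x.2.2])).getLast? = some (rest.getLastD e).2.2 := by
  induction rest generalizing e with
  | nil => simp
  | cons c cs ih =>
      rw [List.flatMap_cons, List.getLastD_cons]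
      rw [show [e.2.1, e.2.2] ++ (c :: cs).flatMap (fun x => [x.2.1, x.2.2])
            = e.2.1 :: e.2.2 :: (c :: cs).flatMap (fun x => [x.2.1, x.2.2]) from rfl]
      have hne : ((c :: cs).flatMap (fun x => [x.2.1, x.2.2])) ≠ [] := by
        simp [List.flatMap_cons]
      rw [List.getLast?_cons_cons]
      cases hcc : (c :: cs).flatMap (fun x => [x.2.1, x.2.2]) with
      | nil => exact absurd hcc hne
      | cons y ys => rw [List.getLast?_cons_cons, ← hcc, ih c]

-- ===== VERDICT (by name: the statement is the Claim_ definition above) =====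
theorem getSplicedTranscript_spec : Claim_equal_getSplicedTranscript := by
  intro exons _ hpre
  cases exons with
  | nil => exact absurd rfl hpre
  | cons e rest =>
      show getSplicedTranscript (e :: rest) = getSplicedTranscript_alt (e :: rest)
      unfold getSplicedTranscript getSplicedTranscript_alt
      rw [List.foldl_cons,
        show stepA (none, none, [], "") e = (some e.2.1, some e, [], e.1) from rfl,
        foldA_char rest e.2.1 e [] e.1]
      rw [foldC_eq]
      simp only [List.nil_append]
      set F := (e :: rest).flatMap (fun x => [x.2.1, x.2.2]) with hF
      have hFne : F ≠ [] := by simp [hF, List.flatMap_cons]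
      have hlen : 2 ≤ F.length := by
        simp [hF, List.flatMap_cons]
      rw [PySem.List.pyGet?_neg_one, PySem.List.pyGet?_neg_one, PySem.List.pyGet?_zero,
        getLast?_cons_eq_getLastD, getLast?_flat]
      have h0 : F[0]? = some e.2.1 := by simp [hF, List.flatMap_cons]
      rw [h0]
      have hslice : PySem.List.slice F (some 1) (some (-1)) = (F.drop 1).dropLast := by
        have hmin : min 1 F.length = 1 := by omega
        simp [PySem.List.slice, PySem.List.clampIdx, hFne, hmin]
        rw [List.dropLast_eq_take]
        congr 1
        simp [List.length_tail]
        omega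
      rw [hslice, interior_eq]
      cases rest with
      | nil => simp [List.getLastD]
      | cons d ds => simp
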